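-- pv_equiv track=rewrite | github.com/Viha123/aoc-viha | 2023/day10/10.py | countTop
-- ===== SOURCE A (Python) =====
-- def countTop(steps,r,c):
--     #counts the borders on top
--     count = 0
--     r -= 1 # go up first
--     bends = ["L", "F", "7", "J"]
--     left = ["7", "J"]
--     right = ["F", "L"]
--     stack = []
--     while(r >= 0):
--         if steps[r][c] == "-":
--             count +=1
--         elif steps[r][c] in bends:
--             if len(stack) == 0:
--                 stack.append(steps[r][c])
--             else:
--                 popped = stack.pop()
--                 if popped in left and steps[r][c] in left or popped in right and steps[r][c] in right: #if both are facing same dir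
--                     #don't add to count
--                     pass
--                 else:
--                     count += 1
--         else:
--             pass
--         r-=1 #go up rows
--     return count
-- ===== SOURCE B (Python) =====
-- def countTop(steps, r, c):
--     # Two-pass: collect dashes count and bend chars top-down, then score consecutive bend pairs.
--     dashes = 0
--     ups = []
--     for i in range(r - 1, -1, -1):
--         ch = steps[i][c]
--         if ch == "-":
--             dashes += 1
--         elif ch in ("L", "F", "7", "J"):
--             ups.append(ch)
--     total = dashes
--     for j in range(0, len(ups) - 1, 2):
--         a, b = ups[j], ups[j + 1]
--         same = (a in ("7", "J") and b in ("7", "J")) or (a in ("F", "L") and b in ("F", "L"))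
--         if not same:
--             total += 1
--     return total
-- ===== Notes on version B (the rewrite author's own statement) =====
-- stated objective: alternative
-- what changed: A's single interleaved loop with an inline one-element stack is replaced by a collect pass (count dashes, gather bend characters top-down) followed by a separate pass scoring consecutive bend pairs two at a time.
import Mathlib
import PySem

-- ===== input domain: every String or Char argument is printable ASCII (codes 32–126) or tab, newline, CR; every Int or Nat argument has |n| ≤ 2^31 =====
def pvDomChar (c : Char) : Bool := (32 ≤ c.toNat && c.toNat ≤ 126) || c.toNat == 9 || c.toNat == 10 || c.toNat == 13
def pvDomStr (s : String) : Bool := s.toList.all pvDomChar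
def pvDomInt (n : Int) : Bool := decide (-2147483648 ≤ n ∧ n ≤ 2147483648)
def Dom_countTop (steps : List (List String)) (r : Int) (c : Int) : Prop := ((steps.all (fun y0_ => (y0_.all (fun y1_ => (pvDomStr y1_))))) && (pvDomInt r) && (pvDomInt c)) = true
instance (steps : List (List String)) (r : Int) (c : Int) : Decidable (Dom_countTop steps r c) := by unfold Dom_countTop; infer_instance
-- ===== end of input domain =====

-- B replaces A's inline one-element stack with a collect pass (dashes + bend list, top-down)
-- followed by a separate pass scoring consecutive bend pairs; same O(r) cost (objective: alternative).

-- the cell steps[i][c] (i ≥ 0 here; default "" is only reached outside Pre_countTop, where Python raises)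
def pvCell (steps : List (List String)) (c : Int) (i : Nat) : String :=
  PySem.List.pyGetD (PySem.List.pyGetD steps (i : Int) []) c ""

-- ===== PORT A =====
-- the while loop: fuel n means rows n-1, n-2, …, 0 remain; stack and count as in A
def countTopGo (steps : List (List String)) (c : Int) : Nat → List String → Int → Int
  | 0, _, count => count
  | n+1, stack, count =>
    let s := pvCell steps c n
    if s = "-" then countTopGo steps c n stack (count + 1)
    else if s = "L" ∨ s = "F" ∨ s = "7" ∨ s = "J" then
      match stack with
      | [] => countTopGo steps c n [s] count
      | popped :: rest =>
        if ((popped = "7" ∨ popped = "J") ∧ (s = "7" ∨ s = "J")) ∨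
           ((popped = "F" ∨ popped = "L") ∧ (s = "F" ∨ s = "L")) then
          countTopGo steps c n rest count
        else countTopGo steps c n rest (count + 1)
    else countTopGo steps c n stack count

def countTop (steps : List (List String)) (r : Int) (c : Int) : Int :=
  countTopGo steps c r.toNat [] 0

-- ===== PORT B =====
-- first pass: (number of "-", list of bends in top-down encounter order) over rows n-1 … 0
def countTopCollect (steps : List (List String)) (c : Int) : Nat → Int × List String
  | 0 => (0, [])
  | n+1 =>
    let s := pvCell steps c n
    let p := countTopCollect steps c n
    if s = "-" then (p.1 + 1, p.2)
    else if s = "L" ∨ s = "F" ∨ s = "7" ∨ s = "J" then (p.1, s :: p.2)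
    else p

-- second pass: consecutive pairs, +1 for a pair not facing the same side; leftover ignored
def countTopPairs : List String → Int
  | a :: b :: rest =>
    (if ((a = "7" ∨ a = "J") ∧ (b = "7" ∨ b = "J")) ∨
        ((a = "F" ∨ a = "L") ∧ (b = "F" ∨ b = "L")) then 0 else 1) + countTopPairs rest
  | _ => 0

def countTop_alt (steps : List (List String)) (r : Int) (c : Int) : Int :=
  let p := countTopCollect steps c r.toNat
  p.1 + countTopPairs p.2

-- ===== PRECONDITION & SPEC =====
-- Pre_ excludes exactly the inputs where Python A raises an IndexError: some visited row
-- index r-1 … 0 is out of range, or column c is out of range for a visited row.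
def Pre_countTop (steps : List (List String)) (r : Int) (c : Int) : Prop :=
  r.toNat ≤ steps.length ∧ ∀ row ∈ steps.take r.toNat, PySem.Raise.InRange row.length c
instance (steps : List (List String)) (r : Int) (c : Int) : Decidable (Pre_countTop steps r c) := by
  unfold Pre_countTop; infer_instance

def pvWitness_countTop : List (List String) × Int × Int :=
  ([["L"], ["-"], ["J"], ["."]], 4, 0)

def Spec_countTop (steps : List (List String)) (r : Int) (c : Int) (out : Int) : Prop := out = countTop_alt steps r c
instance (steps : List (List String)) (r : Int) (c : Int) (out : Int) : Decidable (Spec_countTop steps r c out) := by unfold Spec_countTop; infer_instance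

-- ===== CLAIM (what is proved, stated in full; the proofs are below) =====
def Claim_equal_countTop : Prop := ∀ (steps : List (List String)) (r : Int) (c : Int), Dom_countTop steps r c → Pre_countTop steps r c → Spec_countTop steps r c (countTop steps r c)

-- ===== LEMMAS AND PROOFS =====

lemma countTopPairs_le_one (stack : List String) (h : stack.length ≤ 1) :
    countTopPairs stack = 0 := by
  match stack with
  | [] => rfl
  | [a] => rfl
  | a :: b :: rest => simp at h

lemma countTopGo_eq (steps : List (List String)) (c : Int) :
    ∀ (n : Nat) (stack : List String) (count : Int), stack.length ≤ 1 →
      countTopGo steps c n stack count =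
        count + (countTopCollect steps c n).1 +
          countTopPairs (stack ++ (countTopCollect steps c n).2) := by
  intro n
  induction n with
  | zero =>
    intro stack count h
    simp [countTopGo, countTopCollect, countTopPairs_le_one stack h]
  | succ n ih =>
    intro stack count h
    simp only [countTopGo, countTopCollect]
    by_cases hdash : pvCell steps c n = "-"
    · simp only [hdash, if_true]
      rw [ih stack (count + 1) h]; ring
    · simp only [if_neg hdash]
      by_cases hbend : pvCell steps c n = "L" ∨ pvCell steps c n = "F" ∨
          pvCell steps c n = "7" ∨ pvCell steps c n = "J"
      · simp only [if_pos hbend]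
        match stack with
        | [] =>
          rw [ih [pvCell steps c n] count (by simp)]
          simp
        | [popped] =>
          simp only [List.cons_append, List.nil_append, countTopPairs]
          split
          · rw [ih [] count (by simp)]; simp
          · rw [ih [] (count + 1) (by simp)]; simp; ring
        | a :: b :: rest => simp at h
      · simp only [if_neg hbend]
        exact ih stack count h

-- ===== VERDICT (by name: the statement is the Claim_ definition above) =====
theorem countTop_spec : Claim_equal_countTop := by
  intro steps r c _ _
  unfold Spec_countTop countTop countTop_alt
  rw [countTopGo_eq steps c r.toNat [] 0 (by simp)]
  simp
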